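-- pv_equiv track=rewrite | github.com/JMespoir/2022_02_Python | Chapter_2/OJ_joonion/Day_caculator.py | solve
-- ===== SOURCE A (Python) =====
-- def solve(N,M):
--     res = 0
--     for i in range(N,M+1):
--         if(isYear(i)):
--             res += 366
--         else:
--             res += 365
--     return res
--
-- def isYear(year):
--     if year %400 == 0 or (year%4==0 and year %100 != 0):
--         return True
--     return False
-- ===== SOURCE B (Python) =====
-- def solve(N, M):
--     # Closed form: 365 days per year plus one per leap year, counted by
--     # inclusion-exclusion with floor division (O(1) instead of a loop).
--     if M < N:
--         return 0
--     def leaps(x):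
--         return x // 4 - x // 100 + x // 400
--     return 365 * (M - N + 1) + leaps(M) - leaps(N - 1)
-- ===== Notes on version B (the rewrite author's own statement) =====
-- stated objective: faster
-- what changed: Replaced the per-year loop with a closed-form count: 365*(M-N+1) plus the number of leap years in [N,M] computed by floor-division inclusion-exclusion (x//4 - x//100 + x//400).
import Mathlib
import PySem

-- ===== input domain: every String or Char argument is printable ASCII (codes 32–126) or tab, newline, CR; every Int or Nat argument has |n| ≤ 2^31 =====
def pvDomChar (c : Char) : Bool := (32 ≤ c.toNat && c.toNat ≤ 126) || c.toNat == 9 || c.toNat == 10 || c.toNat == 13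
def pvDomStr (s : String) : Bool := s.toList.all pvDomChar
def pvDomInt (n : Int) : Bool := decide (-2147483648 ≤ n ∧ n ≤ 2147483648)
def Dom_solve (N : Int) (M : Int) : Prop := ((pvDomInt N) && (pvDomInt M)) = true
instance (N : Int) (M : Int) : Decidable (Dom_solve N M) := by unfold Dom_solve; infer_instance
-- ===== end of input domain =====

-- B replaces A's per-year loop with an O(1) closed form (leap count by floor-division inclusion-exclusion).

-- ===== PORT A =====
def isYear (year : Int) : Bool :=
  if PySem.Int.mod year 400 == 0 || (PySem.Int.mod year 4 == 0 && PySem.Int.mod year 100 != 0) then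
    true
  else
    false

def solve (N : Int) (M : Int) : Int :=
  (PySem.List.pyRange N (M + 1) 1).foldl
    (fun res i => if isYear i then res + 366 else res + 365) 0

-- ===== PORT B =====
def leaps (x : Int) : Int :=
  PySem.Int.floordiv x 4 - PySem.Int.floordiv x 100 + PySem.Int.floordiv x 400

def solve_alt (N : Int) (M : Int) : Int :=
  if M < N then 0
  else 365 * (M - N + 1) + leaps M - leaps (N - 1)

-- ===== PRECONDITION & SPEC =====
def Spec_solve (N : Int) (M : Int) (out : Int) : Prop := out = solve_alt N M
instance (N : Int) (M : Int) (out : Int) : Decidable (Spec_solve N M out) := by unfold Spec_solve; infer_instance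

-- ===== CLAIM (what is proved, stated in full; the proofs are below) =====
def Claim_equal_solve : Prop := ∀ (N : Int) (M : Int), Dom_solve N M → Spec_solve N M (solve N M)

-- ===== LEMMAS AND PROOFS =====

-- one year's contribution equals the difference of the closed form at x and x-1
theorem leaps_step (x : Int) :
    (if isYear x then (366 : Int) else 365) = 365 + (leaps x - leaps (x - 1)) := by
  have h4 : PySem.Int.floordiv x 4 = x / 4 := PySem.Int.floordiv_eq_ediv_of_pos (by norm_num)
  have h100 : PySem.Int.floordiv x 100 = x / 100 := PySem.Int.floordiv_eq_ediv_of_pos (by norm_num)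
  have h400 : PySem.Int.floordiv x 400 = x / 400 := PySem.Int.floordiv_eq_ediv_of_pos (by norm_num)
  have h4' : PySem.Int.floordiv (x - 1) 4 = (x - 1) / 4 := PySem.Int.floordiv_eq_ediv_of_pos (by norm_num)
  have h100' : PySem.Int.floordiv (x - 1) 100 = (x - 1) / 100 := PySem.Int.floordiv_eq_ediv_of_pos (by norm_num)
  have h400' : PySem.Int.floordiv (x - 1) 400 = (x - 1) / 400 := PySem.Int.floordiv_eq_ediv_of_pos (by norm_num)
  have hm4 : PySem.Int.mod x 4 = x % 4 := PySem.Int.mod_eq_emod_of_pos (by norm_num)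
  have hm100 : PySem.Int.mod x 100 = x % 100 := PySem.Int.mod_eq_emod_of_pos (by norm_num)
  have hm400 : PySem.Int.mod x 400 = x % 400 := PySem.Int.mod_eq_emod_of_pos (by norm_num)
  have hiy : isYear x = (x % 400 == 0 || (x % 4 == 0 && x % 100 != 0)) := by
    unfold isYear
    rw [hm400, hm4, hm100]
    split <;> simp_all
  rw [hiy]
  unfold leaps
  rw [h4, h100, h400, h4', h100', h400']
  by_cases hc : (x % 400 == 0 || (x % 4 == 0 && x % 100 != 0)) = true
  · rw [if_pos hc]
    simp only [Bool.or_eq_true, Bool.and_eq_true, beq_iff_eq, bne_iff_ne, ne_eq] at hc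
    omega
  · rw [if_neg hc]
    simp only [Bool.or_eq_true, Bool.and_eq_true, beq_iff_eq, bne_iff_ne, ne_eq, not_or,
      not_and_or, not_not] at hc
    omega

theorem solve_closed (d : Nat) : ∀ (N M : Int), M + 1 - N = (d : Int) →
    solve N M = 365 * (M - N + 1) + leaps M - leaps (N - 1) := by
  induction d with
  | zero =>
    intro N M h
    have hNM : M + 1 = N := by omega
    simp [solve, PySem.List.pyRange_one_eq_nil (by omega : M + 1 ≤ N)]
    have : M = N - 1 := by omega
    subst this
    ring
  | succ k ih =>
    intro N M h
    have hle : N ≤ M := by omega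
    have hsplit : PySem.List.pyRange N (M + 1) 1
        = PySem.List.pyRange N M 1 ++ [M] :=
      PySem.List.pyRange_one_succ_right (by omega)
    have hprev := ih N (M - 1) (by omega)
    simp only [solve] at hprev ⊢
    rw [show M - 1 + 1 = M by ring] at hprev
    rw [hsplit, List.foldl_append, hprev]
    simp only [List.foldl_cons, List.foldl_nil]
    have hstep := leaps_step M
    split_ifs at hstep ⊢ <;> linarith

theorem solve_spec : Claim_equal_solve := by
  intro N M _
  unfold Spec_solve solve_alt
  split_ifs with h
  · simp [solve, PySem.List.pyRange_one_eq_nil (by omega : M + 1 ≤ N)]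
  · exact solve_closed (M + 1 - N).toNat N M (by omega)
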